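-- pv_equiv track=rewrite | github.com/AlpGoXd/Euler-Project | 4th question/4th.py | find
-- ===== SOURCE A (Python) =====
-- def inv(x):
--     a = 0
--     while x > 0:
--         c = x % 10
--         a = a * 10 + c
--         x = x // 10
--     return a
--
-- def pali(x):
--     if 10 > x >= 0:
--         return 0
--     if x == inv(x):
--         return 1
--     else:
--         return 0
--
-- def find(z):
--     found = set()
--     for x in range(z):
--         a = 0
--         while x >= a:
--             c = x * a
--             if pali(c) == 1:
--                 found.add(c)
--             a = a + 1
--     return found
-- ===== SOURCE B (Python) =====
-- def find(z):
--     found = set()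
--     if z < 2:
--         return found
--     m = (z - 1) ** 2
--     pals = [c for c in range(10, m + 1) if str(c) == str(c)[::-1]]
--     for x in range(1, z):
--         for p in pals:
--             if p > x * x:
--                 break
--             if p % x == 0 and p // x <= x:
--                 found.add(p)
--     return found
-- ===== Notes on version B (the rewrite author's own statement) =====
-- stated objective: alternative
-- what changed: B precomputes one ascending list of all multi-digit palindromes up to the square of the largest factor (string-reversal test) and, for each candidate factor, collects the palindromes that are its multiples with quotient at most itself, instead of enumerating every factor pair and testing each product by arithmetic digit reversal.
import Mathlib
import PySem

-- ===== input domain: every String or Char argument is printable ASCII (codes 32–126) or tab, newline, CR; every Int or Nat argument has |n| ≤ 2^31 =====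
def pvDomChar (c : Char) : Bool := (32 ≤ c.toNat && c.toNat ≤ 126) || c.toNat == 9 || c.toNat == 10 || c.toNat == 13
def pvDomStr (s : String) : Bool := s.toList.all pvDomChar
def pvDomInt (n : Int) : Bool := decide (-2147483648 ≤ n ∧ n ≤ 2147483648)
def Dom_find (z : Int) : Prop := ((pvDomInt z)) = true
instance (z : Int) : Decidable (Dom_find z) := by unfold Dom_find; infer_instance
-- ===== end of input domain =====

-- B replaces A's pair enumeration by one precomputed ascending list of multi-digit palindromes
-- (string test), scanned per x for multiples of x with cofactor ≤ x (objective: alternative).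


-- ===== PORT A =====
-- helper 'inv': a = 0; while x > 0: c = x % 10; a = a * 10 + c; x = x // 10; return a
def invLoop (x a : Int) : Int :=
  if 0 < x then invLoop (PySem.Int.floordiv x 10) (a * 10 + PySem.Int.mod x 10) else a
termination_by x.toNat
decreasing_by
  rename_i h
  rw [PySem.Int.floordiv_eq_ediv_of_pos (by omega : (0:Int) < 10)]
  omega

def inv (x : Int) : Int := invLoop x 0

def pali (x : Int) : Int :=
  if 10 > x ∧ x ≥ 0 then 0
  else if x = inv x then 1 else 0

-- inner while of A: a = 0; while x >= a: c = x * a; if pali(c) == 1: found.add(c); a = a + 1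
def innerA (x a : Int) (s : PySem.Set Int) : PySem.Set Int :=
  if x ≥ a then
    innerA x (a + 1) (if pali (x * a) = 1 then PySem.Set.add s (x * a) else s)
  else s
termination_by (x + 1 - a).toNat
decreasing_by rename_i h; omega

def find (z : Int) : List Int :=
  (PySem.List.pyRange 0 z 1).foldl (fun s x => innerA x 0 s) PySem.Set.empty

-- ===== PORT B =====
-- str(c) == str(c)[::-1]: s[::-1] is string reversal and string equality is equality of the
-- character lists, so the test is ported on the char-list side (PySem.Int.toChars c = str(c))
def isPalB (c : Int) : Bool := PySem.Int.toChars c == (PySem.Int.toChars c).reverse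

-- inner loop of B: 'for p in pals: if p > x*x: break; if p % x == 0 and p // x <= x: found.add(p)'
def scanB (x : Int) (s : PySem.Set Int) : List Int → PySem.Set Int
  | [] => s
  | p :: rest =>
    if x * x < p then s
    else scanB x (if PySem.Int.mod p x = 0 ∧ PySem.Int.floordiv p x ≤ x then PySem.Set.add s p else s) rest

def find_alt (z : Int) : List Int :=
  if z < 2 then PySem.Set.empty
  else
    let m := (z - 1) ^ 2
    let pals := (PySem.List.pyRange 10 (m + 1) 1).filter (fun c => isPalB c)
    (PySem.List.pyRange 1 z 1).foldl (fun s x => scanB x s pals) PySem.Set.empty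

-- ===== PRECONDITION & SPEC =====
def Spec_find (z : Int) (out : List Int) : Prop := out = find_alt z
instance (z : Int) (out : List Int) : Decidable (Spec_find z out) := by unfold Spec_find; infer_instance

-- ===== CLAIM (what is proved, stated in full; the proofs are below) =====
def Claim_equal_find : Prop := ∀ (z : Int), Dom_find z → Spec_find z (find z)

-- ===== LEMMAS AND PROOFS =====

-- A's digit-reversal loop computes: a shifted past the digits of n, plus the reversed digits of n
theorem invLoop_eq (n : Nat) (a : Int) :
    invLoop (n : Int) a =
      a * 10 ^ (Nat.digits 10 n).length + (Nat.ofDigits 10 (Nat.digits 10 n).reverse : Nat) := by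
  induction n using Nat.strong_induction_on generalizing a with
  | _ n ih =>
    rcases Nat.eq_zero_or_pos n with h0 | hp
    · subst h0; rw [invLoop]; simp
    · rw [invLoop]
      have hlt : (0:Int) < (n:Int) := by exact_mod_cast hp
      rw [if_pos hlt]
      have hds : Nat.digits 10 n = n % 10 :: Nat.digits 10 (n / 10) :=
        Nat.digits_def' (by norm_num) hp
      have hfd : PySem.Int.floordiv (n:Int) 10 = ((n / 10 : Nat) : Int) := by
        exact_mod_cast PySem.Int.floordiv_natCast n 10
      have hmd : PySem.Int.mod (n:Int) 10 = ((n % 10 : Nat) : Int) := by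
        exact_mod_cast PySem.Int.mod_natCast n 10
      rw [hfd, hmd]
      rw [ih (n / 10) (Nat.div_lt_self hp (by norm_num)) _]
      rw [hds]
      simp [List.reverse_cons, Nat.ofDigits_append, Nat.ofDigits_singleton]
      push_cast
      ring

theorem inv_eq (n : Nat) : inv (n : Int) = (Nat.ofDigits 10 (Nat.digits 10 n).reverse : Nat) := by
  unfold inv; rw [invLoop_eq]; simp

-- for n ≥ 10, n equals its digit reversal iff its digit list is a palindrome
theorem inv_pal_iff (n : Nat) (hn : 10 ≤ n) :
    ((n : Int) = inv (n : Int)) ↔ Nat.digits 10 n = (Nat.digits 10 n).reverse := by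
  rw [inv_eq]
  have hn0 : n ≠ 0 := by omega
  have hds : Nat.digits 10 n = n % 10 :: Nat.digits 10 (n / 10) :=
    Nat.digits_def' (by norm_num) (by omega)
  constructor
  · intro h
    have hN : n = Nat.ofDigits 10 (Nat.digits 10 n).reverse := by exact_mod_cast h
    by_cases h0 : n % 10 = 0
    · exfalso
      have hrev : (Nat.digits 10 n).reverse = (Nat.digits 10 (n / 10)).reverse ++ [n % 10] := by
        rw [hds]; simp
      have hofd : Nat.ofDigits 10 ((Nat.digits 10 n).reverse)
          = Nat.ofDigits 10 (Nat.digits 10 (n / 10)).reverse := by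
        rw [hrev, Nat.ofDigits_append, h0]; simp
      have hlt : Nat.ofDigits 10 (Nat.digits 10 (n / 10)).reverse
          < 10 ^ ((Nat.digits 10 (n / 10)).reverse).length :=
        Nat.ofDigits_lt_base_pow_length (by norm_num)
          (fun x hx => Nat.digits_lt_base (by norm_num) (List.mem_reverse.mp hx))
      have hlen : 10 ^ ((Nat.digits 10 n).length) ≤ 10 * n :=
        Nat.base_pow_length_digits_le 10 n (by norm_num) hn0
      rw [hds] at hlen
      simp only [List.length_cons, List.length_reverse] at hlt hlen
      rw [pow_succ] at hlen
      have h10 : 10 ^ (Nat.digits 10 (n / 10)).length ≤ n := by omega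
      omega
    · have hlast : ∀ hne : (Nat.digits 10 n).reverse ≠ [],
          ((Nat.digits 10 n).reverse).getLast hne ≠ 0 := by
        intro hne
        rw [List.getLast_reverse]
        simp only [hds, List.head_cons]
        exact h0
      have hd := Nat.digits_ofDigits 10 (by norm_num) ((Nat.digits 10 n).reverse)
        (fun x hx => Nat.digits_lt_base (by norm_num) (List.mem_reverse.mp hx)) hlast
      rw [← hN] at hd
      exact hd
  · intro h
    have : Nat.ofDigits 10 (Nat.digits 10 n).reverse = n := by
      rw [← h, Nat.ofDigits_digits]
    exact_mod_cast this.symm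

-- bridge for Nat.toDigits (what PySem.Int.toChars computes on nonnegative input)
theorem toDigitsCore_eq (f n : Nat) (l : List Char) (hf : n < f) (hn : 0 < n) :
    Nat.toDigitsCore 10 f n l = ((Nat.digits 10 n).map Nat.digitChar).reverse ++ l := by
  induction f generalizing n l with
  | zero => omega
  | succ f ih =>
    have hds : Nat.digits 10 n = n % 10 :: Nat.digits 10 (n / 10) :=
      Nat.digits_def' (by norm_num) hn
    simp only [Nat.toDigitsCore]
    by_cases h0 : n / 10 = 0
    · rw [if_pos h0, hds, h0]
      simp
    · rw [if_neg h0]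
      have hlt : n / 10 < f := by
        have := Nat.div_lt_self hn (by norm_num : 1 < 10); omega
      rw [ih (n / 10) _ hlt (Nat.pos_of_ne_zero h0), hds]
      simp

theorem digitChar_inj (a b : Nat) (ha : a < 10) (hb : b < 10)
    (h : Nat.digitChar a = Nat.digitChar b) : a = b := by
  interval_cases a <;> interval_cases b <;> first | rfl | (exfalso; revert h; decide)

theorem map_digitChar_inj : ∀ (L1 L2 : List Nat), (∀ x ∈ L1, x < 10) → (∀ x ∈ L2, x < 10) →
    L1.map Nat.digitChar = L2.map Nat.digitChar → L1 = L2
  | [], [], _, _, _ => rfl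
  | a :: t1, b :: t2, h1, h2, h => by
    simp only [List.map_cons, List.cons.injEq] at h
    have := digitChar_inj a b (h1 a (by simp)) (h2 b (by simp)) h.1
    rw [this, map_digitChar_inj t1 t2 (fun x hx => h1 x (by simp [hx])) (fun x hx => h2 x (by simp [hx])) h.2]

theorem toChars_natCast (n : Nat) (hn : 0 < n) :
    PySem.Int.toChars (n : Int) = ((Nat.digits 10 n).map Nat.digitChar).reverse := by
  unfold PySem.Int.toChars
  rw [if_neg (by simp)]
  simp only [Int.toNat_natCast]
  unfold Nat.toDigits
  rw [toDigitsCore_eq (n + 1) n [] (by omega) hn]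
  simp

theorem isPalB_iff (n : Nat) (hn : 0 < n) :
    isPalB (n : Int) = true ↔ Nat.digits 10 n = (Nat.digits 10 n).reverse := by
  unfold isPalB
  rw [toChars_natCast n hn]
  rw [beq_iff_eq, List.reverse_reverse]
  constructor
  · intro h
    exact map_digitChar_inj _ _ (fun x hx => Nat.digits_lt_base (by norm_num) hx)
      (fun x hx => Nat.digits_lt_base (by norm_num) (List.mem_reverse.mp hx))
      (by rw [← h, List.map_reverse])
  · intro h
    conv_lhs => rw [h]
    rw [List.map_reverse, List.reverse_reverse]

-- pali on nonnegative input: 1 exactly for string-palindromic numbers of at least two digits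
theorem pali_iff (c : Int) (hc : 0 ≤ c) :
    pali c = 1 ↔ (10 ≤ c ∧ isPalB c = true) := by
  unfold pali
  by_cases h10 : c < 10
  · rw [if_pos ⟨h10, hc⟩]
    constructor
    · intro h; exact absurd h (by norm_num)
    · intro h; omega
  · rw [if_neg (by push Not; intro h; omega)]
    push Not at h10
    obtain ⟨n, rfl⟩ : ∃ n : Nat, c = (n : Int) := ⟨c.toNat, (Int.toNat_of_nonneg hc).symm⟩
    have hn10 : 10 ≤ n := by exact_mod_cast h10
    rw [isPalB_iff n (by omega)]
    constructor
    · intro h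
      refine ⟨h10, ?_⟩
      rw [← inv_pal_iff n hn10]
      split_ifs at h with he
      · exact he
      · exact absurd h (by norm_num)
    · rintro ⟨-, hpal⟩
      rw [if_pos ((inv_pal_iff n hn10).mpr hpal)]

-- A's inner while loop as a fold over range(a, x + 1)
theorem innerA_eq_foldl (x : Int) : ∀ (k : Nat) (a : Int) (s : PySem.Set Int),
    (x + 1 - a).toNat = k →
    innerA x a s = (PySem.List.pyRange a (x + 1) 1).foldl
      (fun s a => if pali (x * a) = 1 then PySem.Set.add s (x * a) else s) s := by
  intro k
  induction k with
  | zero =>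
    intro a s hk
    rw [innerA, if_neg (by omega), PySem.List.pyRange_one_eq_nil (by omega)]
    rfl
  | succ k ih =>
    intro a s hk
    rw [innerA, if_pos (by omega), PySem.List.pyRange_one_cons (by omega : a < x + 1)]
    rw [List.foldl_cons]
    exact ih (a + 1) _ (by omega)

-- B's scan with break as a fold over the takeWhile prefix
theorem scanB_eq_foldl (x : Int) : ∀ (ps : List Int) (s : PySem.Set Int),
    scanB x s ps = (ps.takeWhile (fun p => decide (p ≤ x * x))).foldl
      (fun s p => if PySem.Int.mod p x = 0 ∧ PySem.Int.floordiv p x ≤ x then PySem.Set.add s p else s) s := by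
  intro ps
  induction ps with
  | nil => intro s; rfl
  | cons p rest ih =>
    intro s
    rw [scanB]
    by_cases h : x * x < p
    · rw [if_pos h, List.takeWhile_cons_of_neg (by simpa using h)]
      rfl
    · rw [if_neg h, List.takeWhile_cons_of_pos (by simpa using not_lt.mp h)]
      rw [List.foldl_cons]
      exact ih _

-- on a strictly increasing list, takeWhile (≤ K) is filter (≤ K)
theorem takeWhile_eq_filter_of_lt (K : Int) : ∀ (ps : List Int), ps.Pairwise (· < ·) →
    ps.takeWhile (fun p => decide (p ≤ K)) = ps.filter (fun p => decide (p ≤ K)) := by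
  intro ps
  induction ps with
  | nil => intro _; rfl
  | cons p rest ih =>
    intro hp
    rw [List.pairwise_cons] at hp
    by_cases h : p ≤ K
    · rw [List.takeWhile_cons_of_pos (by simpa using h), List.filter_cons_of_pos (by simpa using h), ih hp.2]
    · rw [List.takeWhile_cons_of_neg (by simpa using h), List.filter_cons_of_neg (by simpa using h)]
      rw [List.filter_eq_nil_iff.mpr]
      intro q hq
      have := hp.1 q hq
      simp; omega

-- a guarded fold of Set.add is a fold of Set.add over the filtered list
theorem foldl_guard (cond : Int → Prop) [DecidablePred cond] :
    ∀ (L : List Int) (s : PySem.Set Int),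
    L.foldl (fun s p => if cond p then PySem.Set.add s p else s) s
      = (L.filter (fun p => decide (cond p))).foldl PySem.Set.add s := by
  intro L
  induction L with
  | nil => intro s; rfl
  | cons p rest ih =>
    intro s
    rw [List.foldl_cons, List.filter_cons]
    by_cases h : cond p
    · rw [if_pos h, if_pos (by simpa using h), List.foldl_cons, ih]
    · rw [if_neg h, if_neg (by simpa using h), ih]

-- per x: B's palindromic multiples of x with cofactor ≤ x are exactly A's palindromic products x*a, a ≤ x
theorem addList_eq (z x : Int) (h1 : 1 ≤ x) (hx : x < z) :
    ((((PySem.List.pyRange 10 ((z - 1) ^ 2 + 1) 1).filter (fun c => isPalB c)).filter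
        (fun p => decide (p ≤ x * x))).filter
      (fun p => decide (PySem.Int.mod p x = 0 ∧ PySem.Int.floordiv p x ≤ x)))
    = ((PySem.List.pyRange 0 (x + 1) 1).map (fun a => x * a)).filter
      (fun c => decide (pali c = 1)) := by
  have hx0 : (0:Int) < x := by omega
  have hxm : x * x ≤ (z - 1) ^ 2 := by nlinarith
  have hpB : (((((PySem.List.pyRange 10 ((z - 1) ^ 2 + 1) 1).filter (fun c => isPalB c)).filter
        (fun p => decide (p ≤ x * x))).filter
      (fun p => decide (PySem.Int.mod p x = 0 ∧ PySem.Int.floordiv p x ≤ x)))).Pairwise (· < ·) :=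
    ((((PySem.List.pairwise_lt_pyRange_one 10 ((z - 1) ^ 2 + 1)).filter _).filter _).filter _)
  have hpA : (((PySem.List.pyRange 0 (x + 1) 1).map (fun a => x * a)).filter
      (fun c => decide (pali c = 1))).Pairwise (· < ·) := by
    refine List.Pairwise.filter _ ?_
    refine List.Pairwise.map _ (fun a b hab => ?_) (PySem.List.pairwise_lt_pyRange_one 0 (x + 1))
    exact mul_lt_mul_of_pos_left hab hx0
  have hmem : ∀ p : Int,
      (p ∈ (((PySem.List.pyRange 10 ((z - 1) ^ 2 + 1) 1).filter (fun c => isPalB c)).filter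
        (fun p => decide (p ≤ x * x))).filter
          (fun p => decide (PySem.Int.mod p x = 0 ∧ PySem.Int.floordiv p x ≤ x)))
      ↔ (p ∈ ((PySem.List.pyRange 0 (x + 1) 1).map (fun a => x * a)).filter
          (fun c => decide (pali c = 1))) := by
    intro p
    simp only [List.mem_filter, List.mem_map, PySem.List.mem_pyRange_one, decide_eq_true_eq]
    constructor
    · rintro ⟨⟨⟨⟨h10, hlt⟩, hpal⟩, hle⟩, hmod, hdiv⟩
      have hdvd : x ∣ p := (PySem.Int.mod_eq_zero_iff_dvd p x).mp hmod
      rw [PySem.Int.floordiv_eq_ediv_of_pos hx0] at hdiv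
      have hp0 : (0:Int) ≤ p := by omega
      refine ⟨⟨p / x, ⟨Int.ediv_nonneg hp0 (le_of_lt hx0), by omega⟩, ?_⟩, ?_⟩
      · rw [mul_comm]; exact (Int.ediv_mul_cancel hdvd)
      · exact (pali_iff p hp0).mpr ⟨by omega, hpal⟩
    · rintro ⟨⟨a, ⟨ha0, halt⟩, rfl⟩, hpal1⟩
      have hp0 : (0:Int) ≤ x * a := mul_nonneg (le_of_lt hx0) ha0
      obtain ⟨h10, hpal⟩ := (pali_iff _ hp0).mp hpal1
      have hle : x * a ≤ x * x := mul_le_mul_of_nonneg_left (by omega) (le_of_lt hx0)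
      refine ⟨⟨⟨⟨h10, by omega⟩, hpal⟩, hle⟩, ?_, ?_⟩
      · exact (PySem.Int.mod_eq_zero_iff_dvd _ x).mpr (dvd_mul_right x a)
      · rw [PySem.Int.floordiv_eq_ediv_of_pos hx0, Int.mul_ediv_cancel_left a (by omega)]
        omega
  exact List.Perm.eq_of_pairwise (fun a b _ _ hab hba => le_antisymm hab hba)
    (hpB.imp le_of_lt) (hpA.imp le_of_lt)
    ((List.perm_ext_iff_of_nodup (hpB.nodup) (hpA.nodup)).mpr hmem)

theorem foldlA_map (x : Int) (L : List Int) (s : PySem.Set Int) :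
    L.foldl (fun s a => if pali (x * a) = 1 then PySem.Set.add s (x * a) else s) s
      = (L.map (fun a => x * a)).foldl (fun s c => if pali c = 1 then PySem.Set.add s c else s) s := by
  rw [List.foldl_map]

-- per x with 1 ≤ x < z, A's inner while loop and B's scan of the palindrome list agree
theorem body_eq (z x : Int) (h1 : 1 ≤ x) (hx : x < z) (s : PySem.Set Int) :
    innerA x 0 s =
      scanB x s ((PySem.List.pyRange 10 ((z - 1) ^ 2 + 1) 1).filter (fun c => isPalB c)) := by
  rw [innerA_eq_foldl x ((x + 1 - 0).toNat) 0 s rfl,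
      foldlA_map,
      foldl_guard (fun c => pali c = 1),
      ← addList_eq z x h1 hx,
      ← foldl_guard (fun p => PySem.Int.mod p x = 0 ∧ PySem.Int.floordiv p x ≤ x),
      ← takeWhile_eq_filter_of_lt (x * x) _ ((PySem.List.pairwise_lt_pyRange_one 10 ((z - 1) ^ 2 + 1)).filter _),
      ← scanB_eq_foldl]

-- A's iteration at x = 0 adds nothing (0 is a single-digit product)
theorem innerA_zero (s : PySem.Set Int) : innerA 0 0 s = s := by
  rw [innerA, if_pos (by omega), innerA, if_neg (by omega)]
  norm_num [pali]

theorem find_eq (z : Int) : find z = find_alt z := by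
  unfold find find_alt
  by_cases h2 : z < 2
  · rw [if_pos h2]
    by_cases h0 : 0 < z
    · have hz1 : z = 1 := by omega
      subst hz1
      rw [PySem.List.pyRange_one_cons (by omega), PySem.List.pyRange_one_eq_nil (by omega)]
      simp only [List.foldl_cons, List.foldl_nil]
      exact innerA_zero _
    · rw [PySem.List.pyRange_one_eq_nil (by omega)]
      rfl
  · rw [if_neg h2]
    dsimp only
    rw [PySem.List.pyRange_one_cons (by omega : (0:Int) < z)]
    simp only [List.foldl_cons]
    rw [innerA_zero]
    exact PySem.List.foldl_congr_mem _ _ _ _ (fun acc x hx => by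
      rw [PySem.List.mem_pyRange_one] at hx
      exact body_eq z x hx.1 hx.2 acc)

-- ===== VERDICT (by name: the statement is the Claim_ definition above) =====
theorem find_spec : Claim_equal_find := by
  intro z _
  unfold Spec_find
  exact find_eq z
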